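-- pv_equiv track=rewrite | github.com/aitomatic/dana | opendxa/dana/sandbox/parser/utils/identifier_utils.py | is_valid_identifier
-- ===== SOURCE A (Python) =====
-- def is_valid_identifier(term: str) -> bool:
--     """
--     Check if a term is a valid Python/Dana identifier.
--
--     A valid identifier must:
--     - Start with a letter (a-z, A-Z) or underscore (_)
--     - Contain only letters, digits, and underscores
--     - Support dotted notation (e.g., "obj.attr", "local.var")
--
--     Args:
--         term: The term to check
--
--     Returns:
--         True if the term is a valid identifier, False otherwise
--
--     Examples:
--         >>> is_valid_identifier("x")
--         True
--         >>> is_valid_identifier("question_2")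
--         True
--         >>> is_valid_identifier("_private")
--         True
--         >>> is_valid_identifier("obj.attr")
--         True
--         >>> is_valid_identifier("123invalid")
--         False
--         >>> is_valid_identifier("with-dash")
--         False
--         >>> is_valid_identifier("")
--         False
--     """
--     if not term:
--         return False
--
--     # Handle dotted identifiers (e.g., "local.var", "obj.attr")
--     parts = term.split(".")
--     for part in parts:
--         if not part:  # Empty part (consecutive dots)
--             return False
--         # Check if each part is a valid identifier
--         if not (part.replace("_", "").isalnum() and (part[0].isalpha() or part[0] == "_")):
--             return False
--
--     return True
-- ===== SOURCE B (Python) =====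
-- def is_valid_identifier(term: str) -> bool:
--     """Single left-to-right scan; at_start tracks the beginning of each dotted part."""
--     at_start = True
--     for ch in term:
--         if ch == ".":
--             if at_start:
--                 return False
--             at_start = True
--         elif at_start:
--             if not (ch.isalpha() or ch == "_"):
--                 return False
--             at_start = False
--         elif ch != "_" and not ch.isalnum():
--             return False
--     return not at_start
-- ===== Notes on version B (the rewrite author's own statement) =====
-- stated objective: alternative
-- what changed: A splits the string on '.' and checks each part with replace('_','')+isalnum plus a first-character test; B makes one left-to-right character scan carrying only an at-start-of-part flag and never builds part lists.
-- intended difference: On otherwise-valid dotted identifiers in which some part consists entirely of underscores (e.g. '_' or 'x._'), A returns False because stripping underscores leaves '' and ''.isalnum() is False, while B returns True; '_' is a valid Python identifier, so B's value is the intended one. — e.g. on is_valid_identifier("_"): A returns false, B returns true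
import Mathlib
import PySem

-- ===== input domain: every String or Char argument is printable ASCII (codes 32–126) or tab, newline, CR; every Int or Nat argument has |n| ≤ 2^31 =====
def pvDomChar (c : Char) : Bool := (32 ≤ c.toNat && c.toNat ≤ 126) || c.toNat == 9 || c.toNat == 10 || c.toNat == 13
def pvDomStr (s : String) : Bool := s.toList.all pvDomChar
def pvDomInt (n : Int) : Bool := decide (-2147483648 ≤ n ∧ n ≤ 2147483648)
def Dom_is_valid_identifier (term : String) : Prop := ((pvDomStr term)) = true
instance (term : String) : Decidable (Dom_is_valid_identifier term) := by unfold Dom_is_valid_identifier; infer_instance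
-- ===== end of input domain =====

-- B replaces A's split-into-parts-then-check-each-part pass with a single left-to-right character scan;
-- objective: alternative. A and B intentionally differ on all-underscore parts (see D_ below).

-- ===== PORT A =====
-- the 'for part in parts' loop with its early returns
def aLoop : List (List Char) → Bool
  | [] => true
  | part :: rest =>
    if part = [] then false
    else if !(PySem.Chars.strIsalnum (PySem.Chars.replace part ['_'] []) &&
              ((PySem.List.pyGet? part 0).elim false
                 (fun c => PySem.Chars.isalpha c || c == '_'))) then false
    else aLoop rest

def is_valid_identifier (term : String) : Bool :=
  if term.toList.isEmpty then false
  else aLoop (PySem.Chars.splitOn term.toList ['.'])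

-- ===== PORT B =====
-- the single scan: atStart = at the beginning of the current dotted part
def bLoop : List Char → Bool → Bool
  | [], atStart => !atStart
  | c :: rest, atStart =>
    if c == '.' then
      if atStart then false else bLoop rest true
    else if atStart then
      if !(PySem.Chars.isalpha c || c == '_') then false
      else bLoop rest false
    else if c != '_' && !PySem.Chars.isalnum c then false
    else bLoop rest false

def is_valid_identifier_alt (term : String) : Bool := bLoop term.toList true

-- ===== PRECONDITION & SPEC =====
-- helper used by D_: a plain split at '.'
def dparts : List Char → List Char → List (List Char)
  | [], cur => [cur.reverse]
  | c :: rest, cur => if c = '.' then cur.reverse :: dparts rest [] else dparts rest (c :: cur)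

-- On otherwise-valid dotted identifiers in which some part consists entirely of underscores (e.g. "_" or
-- "x._"), A returns False (stripping underscores leaves "" and "".isalnum() is False) while B returns True;
-- "_" is a valid Python identifier, so B's value is the intended one.
-- D_: every dot-separated part is non-empty, made of underscores/alphanumerics and does not start with a
-- digit, and at least one part consists entirely of underscores.
def D_is_valid_identifier (term : String) : Prop :=
  '_' ∈ term.toList ∧
  (dparts term.toList []).all (fun p => !p.isEmpty &&
     p.all (fun c => c == '_' || PySem.Chars.isalnum c) &&
     !(PySem.Chars.isdigit (p.headD '.'))) = true ∧
  (dparts term.toList []).any (fun p => p.all (· == '_')) = true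
instance (term : String) : Decidable (D_is_valid_identifier term) := by
  unfold D_is_valid_identifier; infer_instance

def Spec_is_valid_identifier (term : String) (out : Bool) : Prop :=
  ¬ D_is_valid_identifier term → out = is_valid_identifier_alt term
instance (term : String) (out : Bool) : Decidable (Spec_is_valid_identifier term out) := by
  unfold Spec_is_valid_identifier; infer_instance

def pvDiffWitness_is_valid_identifier : String := "_"
def pvDiffWitnessOut_is_valid_identifier : Bool × Bool := (false, true)

-- ===== CLAIM (what is proved, stated in full; the proofs are below) =====
def Claim_unchanged_is_valid_identifier : Prop := ∀ (term : String), Dom_is_valid_identifier term → Spec_is_valid_identifier term (is_valid_identifier term)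
def Claim_changed_is_valid_identifier : Prop := Dom_is_valid_identifier (pvDiffWitness_is_valid_identifier) ∧ D_is_valid_identifier (pvDiffWitness_is_valid_identifier) ∧ is_valid_identifier (pvDiffWitness_is_valid_identifier) = pvDiffWitnessOut_is_valid_identifier.1 ∧ is_valid_identifier_alt (pvDiffWitness_is_valid_identifier) = pvDiffWitnessOut_is_valid_identifier.2 ∧ pvDiffWitnessOut_is_valid_identifier.1 ≠ pvDiffWitnessOut_is_valid_identifier.2
def Claim_exact_is_valid_identifier : Prop := ∀ (term : String), Dom_is_valid_identifier term → D_is_valid_identifier term → is_valid_identifier term ≠ is_valid_identifier_alt term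

-- ===== LEMMAS AND PROOFS =====

def firstOK (c : Char) : Bool := PySem.Chars.isalpha c || c == '_'
def charOK (c : Char) : Bool := c == '_' || PySem.Chars.isalnum c
def bpartOK (p : List Char) : Bool :=
  !p.isEmpty && (p.head?.elim false firstOK) && p.all charOK

lemma alnum_eq (c : Char) :
    PySem.Chars.isalnum c = (PySem.Chars.isalpha c || PySem.Chars.isdigit c) := by
  simp [PySem.Chars.isalnum, PySem.Chars.isalpha, PySem.Chars.isdigit]

lemma alpha_not_digit (c : Char) (h : PySem.Chars.isalpha c = true) :
    PySem.Chars.isdigit c = false := by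
  unfold PySem.Chars.isalpha PySem.Chars.isdigit PySem.Chars.isupper PySem.Chars.islower at *
  simp_all [Char.le_def, UInt32.le_iff_toNat_le]
  omega

lemma digit_not_alpha (c : Char) (h : PySem.Chars.isdigit c = true) :
    PySem.Chars.isalpha c = false := by
  cases ha : PySem.Chars.isalpha c
  · rfl
  · rw [alpha_not_digit c ha] at h; cases h

lemma bpartOK_eq (p : List Char) :
    (!p.isEmpty && p.all (fun c => c == '_' || PySem.Chars.isalnum c) &&
      !(PySem.Chars.isdigit (p.headD '.'))) = bpartOK p := by
  cases p with
  | nil => simp [bpartOK]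
  | cons c t =>
    have hco : (fun c => c == '_' || PySem.Chars.isalnum c) = charOK := rfl
    cases hall : (c :: t).all charOK with
    | false => simp [bpartOK, hco, hall]
    | true =>
      have hc : charOK c = true := (List.all_eq_true.1 hall) c List.mem_cons_self
      have hfd : (!PySem.Chars.isdigit c) = firstOK c := by
        simp only [charOK, Bool.or_eq_true, beq_iff_eq] at hc
        rcases hc with h | h
        · subst h; decide
        · rw [alnum_eq] at h
          cases hd : PySem.Chars.isdigit c with
          | false => rw [hd, Bool.or_false] at h; simp [firstOK, h]
          | true =>
            have hne : ¬ c = '_' := fun he => by subst he; exact absurd hd (by decide)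
            simp [firstOK, digit_not_alpha c hd, hne]
      simp [bpartOK, hco, hall, hfd]

lemma dparts_subset (l : List Char) :
    ∀ (cur p : List Char), p ∈ dparts l cur → ∀ c ∈ p, c ∈ l ∨ c ∈ cur := by
  induction l with
  | nil =>
    intro cur p hp c hc
    simp only [dparts, List.mem_singleton] at hp
    subst hp
    exact Or.inr (List.mem_reverse.1 hc)
  | cons a r ih =>
    intro cur p hp c hc
    by_cases ha : a = '.'
    · subst ha
      simp only [dparts] at hp
      rcases List.mem_cons.1 hp with hp | hp
      · subst hp; exact Or.inr (List.mem_reverse.1 hc)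
      · rcases ih [] p hp c hc with h | h
        · exact Or.inl (List.mem_cons_of_mem _ h)
        · cases h
    · simp only [dparts, if_neg ha] at hp
      rcases ih (a :: cur) p hp c hc with h | h
      · exact Or.inl (List.mem_cons_of_mem _ h)
      · rcases List.mem_cons.1 h with h | h
        · exact Or.inl (h ▸ List.mem_cons_self)
        · exact Or.inr h

lemma D_iff (term : String) :
    D_is_valid_identifier term ↔
    ((dparts term.toList []).all bpartOK &&
     (dparts term.toList []).any (fun p => p.all (· == '_'))) = true := by
  unfold D_is_valid_identifier
  rw [Bool.and_eq_true]
  constructor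
  · rintro ⟨-, h1, h2⟩
    refine ⟨?_, h2⟩
    rw [List.all_eq_true] at h1 ⊢
    exact fun p hp => (bpartOK_eq p) ▸ h1 p hp
  · rintro ⟨h1, h2⟩
    refine ⟨?_, ?_, h2⟩
    · obtain ⟨p, hp, hall⟩ := List.any_eq_true.1 h2
      have hb : bpartOK p = true := List.all_eq_true.1 h1 p hp
      cases p with
      | nil => simp [bpartOK] at hb
      | cons c t =>
        have hc : c = '_' := by
          simpa using (List.all_eq_true.1 hall) c List.mem_cons_self
        rcases dparts_subset term.toList [] (c :: t) hp c List.mem_cons_self with h | h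
        · exact hc ▸ h
        · cases h
    · rw [List.all_eq_true] at h1 ⊢
      exact fun p hp => (bpartOK_eq p) ▸ h1 p hp

lemma splitOn_go_eq (fuel : Nat) :
    ∀ (l cur : List Char) (acc : List (List Char)), l.length ≤ fuel →
      PySem.Chars.splitOn.go ['.'] fuel l cur acc = acc.reverse ++ dparts l cur := by
  induction fuel with
  | zero =>
    intro l cur acc h
    have hl : l = [] := by cases l <;> simp at h ⊢
    subst hl
    rw [PySem.Chars.splitOn.go]; simp [dparts]
  | succ n ih =>
    intro l cur acc h
    cases l with
    | nil =>
      rw [PySem.Chars.splitOn.go]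
      · simp [dparts]
      · omega
    | cons c rest =>
      by_cases hc : c = '.'
      · subst hc
        rw [PySem.Chars.splitOn.go]
        simp only [List.isPrefixOf, BEq.rfl, Bool.and_true, if_pos, List.length_cons,
          List.length_nil, List.drop_succ_cons, List.drop_zero]
        rw [ih rest [] (cur.reverse :: acc) (by simpa using h)]
        simp [dparts]
      · rw [PySem.Chars.splitOn.go]
        have hp : (['.'].isPrefixOf (c :: rest)) = false := by
          simp [List.isPrefixOf]; exact fun hh => absurd hh.symm hc
        simp only [hp, Bool.false_eq_true, if_false]
        rw [ih rest (c :: cur) acc (by simpa using h)]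
        simp [dparts, hc]

lemma splitOn_eq_dparts (l : List Char) :
    PySem.Chars.splitOn l ['.'] = dparts l [] := by
  rw [PySem.Chars.splitOn, splitOn_go_eq (l.length + 1) l [] [] (by omega)]
  simp

lemma replace_go_eq (fuel : Nat) :
    ∀ (l acc : List Char), l.length ≤ fuel →
      PySem.Chars.replace.go ['_'] [] fuel l acc = acc.reverse ++ l.filter (fun c => c != '_') := by
  induction fuel with
  | zero =>
    intro l acc h
    have hl : l = [] := by cases l <;> simp at h ⊢
    subst hl
    rw [PySem.Chars.replace.go]; simp
  | succ n ih =>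
    intro l acc h
    cases l with
    | nil =>
      rw [PySem.Chars.replace.go]
      · simp
      · omega
    | cons c rest =>
      by_cases hc : c = '_'
      · subst hc
        rw [PySem.Chars.replace.go]
        simp only [List.isPrefixOf, BEq.rfl, Bool.and_true, if_pos, List.length_cons,
          List.length_nil, List.drop_succ_cons, List.drop_zero, List.reverse_nil, List.nil_append]
        rw [ih rest acc (by simpa using h)]
        simp
      · rw [PySem.Chars.replace.go]
        have hp : (['_'].isPrefixOf (c :: rest)) = false := by
          simp [List.isPrefixOf]; exact fun hh => absurd hh.symm hc
        simp only [hp, Bool.false_eq_true, if_false]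
        rw [ih rest (c :: acc) (by simpa using h)]
        simp [hc]

lemma replace_eq_filter (p : List Char) :
    PySem.Chars.replace p ['_'] [] = p.filter (fun c => c != '_') := by
  rw [PySem.Chars.replace]
  simp only [List.isEmpty_cons, Bool.false_eq_true, if_false]
  rw [replace_go_eq p.length p [] (le_refl _)]
  simp

def goodC (c : Char) : Bool := c != '_' && PySem.Chars.isalnum c

def partOK (p : List Char) : Bool :=
  !p.isEmpty && PySem.Chars.strIsalnum (p.filter (fun c => c != '_')) &&
    (p.head?.elim false firstOK)

lemma aLoop_eq_all (ps : List (List Char)) : aLoop ps = ps.all partOK := by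
  induction ps with
  | nil => rfl
  | cons p rest ih =>
    cases p with
    | nil => simp [aLoop, partOK]
    | cons c t =>
      simp only [aLoop, replace_eq_filter, List.all_cons, partOK]
      simp only [PySem.List.pyGet?, PySem.List.pyIdx?]
      by_cases h1 : PySem.Chars.strIsalnum ((c :: t).filter (fun c => c != '_')) &&
          (PySem.Chars.isalpha c || c == '_')
      · simp_all [firstOK, Bool.beq_eq_decide_eq]
      · simp_all [firstOK, Bool.beq_eq_decide_eq]

lemma dparts_head (l : List Char) :
    ∀ cur, ∃ t rest, dparts l cur = (cur.reverse ++ t) :: rest := by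
  induction l with
  | nil => intro cur; exact ⟨[], [], by simp [dparts]⟩
  | cons c r ih =>
    intro cur
    by_cases hc : c = '.'
    · exact ⟨[], dparts r [], by simp [dparts, hc]⟩
    · obtain ⟨t, rest, h⟩ := ih (c :: cur)
      exact ⟨c :: t, rest, by simp [dparts, hc, h]⟩

lemma firstOK_charOK (c : Char) (h : firstOK c = true) : charOK c = true := by
  simp [firstOK] at h
  rcases h with h | h
  · simp [charOK, PySem.Chars.isalnum, h]
  · simp [charOK, h]

lemma bpartOK_false_of_bad (p : List Char) (c : Char) (hc : c ∈ p)
    (hbad : charOK c = false) : bpartOK p = false := by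
  have : p.all charOK = false := by
    rw [List.all_eq_false]; exact ⟨c, hc, by simp [hbad]⟩
  simp [bpartOK, this]

lemma not_isEmpty_filter (l : List Char) (p : Char → Bool) :
    (!(l.filter p).isEmpty) = l.any p := by
  cases h : l.any p <;>
    simp_all [List.isEmpty_iff, List.filter_eq_nil_iff, List.any_eq_true, List.any_eq_false]

lemma any_congr_mem (l : List Char) (p q : Char → Bool) (h : ∀ a ∈ l, p a = q a) :
    l.any p = l.any q := by
  apply Bool.eq_iff_iff.mpr
  simp only [List.any_eq_true]
  exact ⟨fun ⟨a,ha,hp⟩ => ⟨a,ha,(h a ha) ▸ hp⟩, fun ⟨a,ha,hq⟩ => ⟨a,ha,(h a ha).symm ▸ hq⟩⟩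

lemma partOK_eq (p : List Char) : partOK p = (bpartOK p && p.any goodC) := by
  cases p with
  | nil => simp [partOK, bpartOK]
  | cons c t =>
    by_cases hf : firstOK c = true
    · have hcc : charOK c = true := firstOK_charOK c hf
      by_cases ht : t.all charOK = true
      · have hall : (c :: t).all charOK = true := by simp [hcc, ht]
        have hfilter_all : ((c :: t).filter (fun x => x != '_')).all PySem.Chars.isalnum = true := by
          rw [List.all_eq_true]
          intro x hx
          have hx' := List.mem_filter.1 hx
          have hco := (List.all_eq_true.1 hall) x hx'.1
          simp only [charOK, Bool.or_eq_true, beq_iff_eq] at hco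
          rcases hco with h | h
          · exact absurd hx'.2 (by simp [h])
          · exact h
        have hany : (c :: t).any (fun x => x != '_') = (c :: t).any goodC := by
          apply any_congr_mem
          intro a ha
          have hco := (List.all_eq_true.1 hall) a ha
          simp only [charOK, Bool.or_eq_true, beq_iff_eq] at hco
          rcases hco with h | h
          · simp [goodC, h]
          · simp [goodC, h]
        simp only [partOK, bpartOK, PySem.Chars.strIsalnum, hfilter_all, Bool.and_true,
          List.head?_cons, Option.elim, hf, hall, List.isEmpty_cons, Bool.not_false,
          Bool.true_and, not_isEmpty_filter, hany]
      · obtain ⟨x, hx, hbad⟩ := List.all_eq_false.1 (by simpa using ht)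
        have hbad0 : charOK x = false := by simpa using hbad
        have h1 : (x == '_') = false := by
          cases hxx : (x == '_') <;> simp_all [charOK]
        have h2 : PySem.Chars.isalnum x = false := by
          cases hxx : PySem.Chars.isalnum x <;> simp_all [charOK]
        have hxne : (x != '_') = true := by simp [bne, h1]
        have hfa : ((c :: t).filter (fun x => x != '_')).all PySem.Chars.isalnum = false := by
          rw [List.all_eq_false]
          exact ⟨x, List.mem_filter.2 ⟨List.mem_cons_of_mem _ hx, hxne⟩, by simp [h2]⟩
        have hba : (c :: t).all charOK = false := by
          rw [List.all_eq_false]; exact ⟨x, List.mem_cons_of_mem _ hx, by simp [hbad0]⟩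
        simp [partOK, bpartOK, PySem.Chars.strIsalnum, hfa, hba]
    · have hf' : firstOK c = false := by simpa using hf
      simp [partOK, bpartOK, hf']

lemma bpartOK_rev (cur : List Char) (hall : cur.all charOK = true)
    (hfst : (cur.getLast?.elim true firstOK) = true) :
    bpartOK cur.reverse = !cur.isEmpty := by
  cases cur with
  | nil => simp [bpartOK]
  | cons c t =>
    rcases hgl : (c :: t).getLast? with _ | d
    · simp at hgl
    · have hl : firstOK d = true := by rw [hgl] at hfst; exact hfst
      have h1 : (c :: t).reverse.head? = some d := by rw [List.head?_reverse, hgl]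
      have h2 : (c :: t).reverse.all charOK = true := by
        rw [List.all_reverse]; exact hall
      have h3 : (c :: t).reverse.isEmpty = false := by simp
      simp only [bpartOK, h1, h2, h3]
      simp [hl]

lemma bLoop_eq (l : List Char) :
    ∀ cur : List Char, cur.all charOK = true →
      (cur.getLast?.elim true firstOK) = true →
      bLoop l cur.isEmpty = (dparts l cur).all bpartOK := by
  induction l with
  | nil =>
    intro cur hall hfst
    simp only [bLoop, dparts, List.all_cons, List.all_nil, Bool.and_true]
    exact (bpartOK_rev cur hall hfst).symm
  | cons c r ih =>
    intro cur hall hfst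
    by_cases hc : c = '.'
    · subst hc
      simp only [bLoop, beq_self_eq_true, if_pos, dparts, List.all_cons]
      rw [bpartOK_rev cur hall hfst]
      have h0 := ih [] (by simp) (by simp)
      simp only [List.isEmpty_nil] at h0
      cases hIsE : cur.isEmpty <;> simp [h0]
    · cases cur with
      | nil =>
        simp only [List.isEmpty_nil, bLoop,
          if_neg (by simp [hc] : ¬((c == '.') = true)), if_pos, dparts, if_neg hc]
        by_cases hf : firstOK c = true
        · have hb : (PySem.Chars.isalpha c || c == '_') = true := by simpa [firstOK] using hf
          rw [if_neg (by simp [hb])]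
          have := ih [c] (by simp [firstOK_charOK c hf]) (by simpa [firstOK] using hf)
          simpa using this
        · have hb : (PySem.Chars.isalpha c || c == '_') = false := by
            simpa [firstOK] using hf
          rw [if_pos (by simp [hb])]
          obtain ⟨t, rest, hcons⟩ := dparts_head r [c]
          rw [hcons]
          have hpo : bpartOK (c :: t) = false := by
            have hf' : firstOK c = false := by simpa using hf
            simp [bpartOK, hf']
          simp [hpo]
      | cons d ds =>
        simp only [List.isEmpty_cons, bLoop,
          if_neg (by simp [hc] : ¬((c == '.') = true)), if_neg (by simp : ¬(false = true))]
        by_cases hk : charOK c = true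
        · rw [if_neg (by simp [charOK] at hk ⊢; tauto)]
          have hall' : (c :: d :: ds).all charOK = true := by simp_all
          have hfst' : ((c :: d :: ds).getLast?.elim true firstOK) = true := by
            rw [List.getLast?_cons_cons]; exact hfst
          have hIH := ih (c :: d :: ds) hall' hfst'
          simp only [List.isEmpty_cons] at hIH
          rw [hIH]
          simp [dparts, hc]
        · rw [if_pos (by simp [charOK] at hk ⊢; tauto)]
          simp only [dparts, if_neg hc]
          obtain ⟨t, rest, hcons⟩ := dparts_head r (c :: d :: ds)
          have hpo : bpartOK ((c :: d :: ds).reverse ++ t) = false := by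
            apply bpartOK_false_of_bad _ c _ (by simpa using hk)
            simp
          rw [hcons, List.all_cons, hpo]
          simp

lemma A_char (term : String) :
    is_valid_identifier term = (dparts term.toList []).all partOK := by
  unfold is_valid_identifier
  cases ht : term.toList with
  | nil => simp [dparts, partOK]
  | cons a as => simp [splitOn_eq_dparts, aLoop_eq_all]

lemma B_char (term : String) :
    is_valid_identifier_alt term = (dparts term.toList []).all bpartOK := by
  unfold is_valid_identifier_alt
  have h := bLoop_eq term.toList [] (by simp) (by simp)
  simpa using h

lemma bpartOK_any_goodC (p : List Char) (hb : bpartOK p = true)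
    (hu : p.all (· == '_') = false) : p.any goodC = true := by
  obtain ⟨x, hx, hxne⟩ := List.all_eq_false.1 hu
  have hbC : p.all charOK = true := by
    simp only [bpartOK, Bool.and_eq_true] at hb; exact hb.2
  have hall := (List.all_eq_true.1 hbC) x hx
  simp only [charOK, Bool.or_eq_true, beq_iff_eq] at hall
  rcases hall with h | h
  · exact absurd h (by simpa using hxne)
  · exact List.any_eq_true.2 ⟨x, hx, by simp [goodC, h, by simpa using hxne]⟩

lemma underscore_no_goodC (p : List Char) (hu : p.all (· == '_') = true) :
    p.any goodC = false := by
  rw [List.any_eq_false]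
  intro x hx
  have := (List.all_eq_true.1 hu) x hx
  simp only [beq_iff_eq] at this
  simp [goodC, this]

-- ===== VERDICT (by name: the statement is the Claim_ definition above) =====
theorem is_valid_identifier_spec : Claim_unchanged_is_valid_identifier := by
  intro term _ hnd
  rw [D_iff, Bool.and_eq_true] at hnd
  rw [A_char, B_char]
  cases hB : (dparts term.toList []).all bpartOK with
  | false =>
    obtain ⟨p, hp, hpb⟩ := List.all_eq_false.1 hB
    have hpb' : bpartOK p = false := by simpa using hpb
    exact List.all_eq_false.2 ⟨p, hp, by simp [partOK_eq, hpb']⟩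
  | true =>
    rw [List.all_eq_true]
    intro p hp
    have hb : bpartOK p = true := List.all_eq_true.1 hB p hp
    have hu : p.all (· == '_') = false := by
      cases h : p.all (· == '_') with
      | false => rfl
      | true => exact absurd ⟨hB, List.any_eq_true.2 ⟨p, hp, h⟩⟩ hnd
    simp [partOK_eq, hb, bpartOK_any_goodC p hb hu]

theorem is_valid_identifier_changed : Claim_changed_is_valid_identifier := by
  unfold Claim_changed_is_valid_identifier
  refine ⟨by decide, ?_, by decide, by decide, by decide⟩
  rw [D_iff]; decide

theorem is_valid_identifier_tight : Claim_exact_is_valid_identifier := by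
  intro term _ hd
  rw [D_iff] at hd
  simp only [Bool.and_eq_true] at hd
  obtain ⟨hB, hAny⟩ := hd
  rw [A_char, B_char, hB]
  obtain ⟨p, hp, hu⟩ := List.any_eq_true.1 hAny
  have : (dparts term.toList []).all partOK = false := by
    rw [List.all_eq_false]
    refine ⟨p, hp, ?_⟩
    rw [partOK_eq, underscore_no_goodC p hu]
    simp
  rw [this]; simp
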